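-- pv_equiv track=rewrite | github.com/adityabalaji97/cricket-data-thing | services/match_preview.py | validate_llm_narrative
-- ===== SOURCE A (Python) =====
-- from typing import Any, Dict, List, Optional
--
-- def _parse_markdown_sections(markdown_text: str) -> List[Dict[str, Any]]:
--     lines = (markdown_text or "").splitlines()
--     sections: List[Dict[str, Any]] = []
--     current: Optional[Dict[str, Any]] = None
--     for raw in lines:
--         line = raw.strip()
--         if not line:
--             continue
--         if line.startswith("## "):
--             if current:
--                 sections.append(current)
--             current = {"title": line[3:].strip(), "bullets": []}
--             continue
--         if line.startswith("- "):
--             if current is None: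
--                 continue
--             current["bullets"].append(line[2:].strip())
--     if current:
--         sections.append(current)
--     return sections
--
-- def validate_llm_narrative(candidate_markdown: str) -> bool:
--     parsed = _parse_markdown_sections(candidate_markdown)
--     # Must have exactly 5 sections
--     if len(parsed) != 5:
--         return False
--     # Section titles must match (case-insensitive)
--     expected = ["Venue Profile", "Form Guide", "Head-to-Head", "Key Matchup Factor", "Preview Take"]
--     for p, e in zip(parsed, expected):
--         if p.get("title", "").strip().lower() != e.lower():
--             return False
--     # Each section must have 1-3 bullets
--     for s in parsed:
--         bullets = s.get("bullets") or []
--         if not (1 <= len(bullets) <= 3):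
--             return False
--     # DROP the "all numbers preserved" check — the LLM should be selective
--     return True
-- ===== SOURCE B (Python) =====
-- def validate_llm_narrative(candidate_markdown: str) -> bool:
--     # Single fused pass: no intermediate sections list, only a position index
--     # and the bullet count of the currently open section.
--     expected = ("venue profile", "form guide", "head-to-head",
--                 "key matchup factor", "preview take")
--     idx = 0          # sections opened so far
--     cur = None       # bullet count of the open section, or None before the first header
--     for raw in candidate_markdown.splitlines():
--         line = raw.strip()
--         if line.startswith("## "):
--             if cur is not None and not (1 <= cur <= 3):
--                 return False
--             if idx >= 5 or line[3:].strip().lower() != expected[idx]: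
--                 return False
--             idx += 1
--             cur = 0
--         elif line.startswith("- ") and cur is not None:
--             cur += 1
--     return cur is not None and 1 <= cur <= 3 and idx == 5
-- ===== Notes on version B (the rewrite author's own statement) =====
-- stated objective: alternative
-- what changed: Replaced A's two-phase design (parse the markdown into a list of section dicts, then run three validation passes over it) by a single fused streaming pass that keeps only a section counter and the open section's bullet count and fails fast.
import Mathlib
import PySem

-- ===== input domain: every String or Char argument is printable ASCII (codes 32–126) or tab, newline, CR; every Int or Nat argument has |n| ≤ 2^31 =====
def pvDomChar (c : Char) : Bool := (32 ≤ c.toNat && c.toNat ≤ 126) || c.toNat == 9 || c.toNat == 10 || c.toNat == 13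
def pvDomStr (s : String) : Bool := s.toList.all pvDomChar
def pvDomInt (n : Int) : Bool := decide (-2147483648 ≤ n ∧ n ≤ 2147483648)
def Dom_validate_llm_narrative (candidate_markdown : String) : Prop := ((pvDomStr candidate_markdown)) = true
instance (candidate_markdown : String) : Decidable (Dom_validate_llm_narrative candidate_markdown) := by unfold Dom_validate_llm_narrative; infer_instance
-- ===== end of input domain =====

-- B replaces A's two-phase parse-into-a-sections-list-then-validate with one fused
-- streaming pass keeping only a section counter and the open section's bullet count
-- (objective: alternative decomposition, same O(n) cost).

-- ===== PORT A =====
-- a section is (title, bullets); 'if current: sections.append(current)'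
def pvClose (st : List (List Char × List (List Char)) × Option (List Char × List (List Char))) :
    List (List Char × List (List Char)) :=
  match st.2 with
  | some cur => st.1 ++ [cur]
  | none => st.1

-- body of the loop in _parse_markdown_sections; state = (sections, current)
def pvParseStep (st : List (List Char × List (List Char)) × Option (List Char × List (List Char)))
    (raw : List Char) : List (List Char × List (List Char)) × Option (List Char × List (List Char)) :=
  let line := PySem.Chars.strip raw
  if line = [] then st
  else if PySem.Chars.startswith line "## ".toList then
    (pvClose st, some (PySem.Chars.strip (PySem.List.slice line (some 3) none), []))
  else if PySem.Chars.startswith line "- ".toList then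
    match st.2 with
    | none => st
    | some cur => (st.1, some (cur.1, cur.2 ++ [PySem.Chars.strip (PySem.List.slice line (some 2) none)]))
  else st

-- _parse_markdown_sections
def pvParse (markdown_text : String) : List (List Char × List (List Char)) :=
  pvClose ((PySem.Chars.splitlines markdown_text.toList).foldl pvParseStep ([], none))

def pvExpected : List (List Char) :=
  ["Venue Profile".toList, "Form Guide".toList, "Head-to-Head".toList,
   "Key Matchup Factor".toList, "Preview Take".toList]

-- the three checks of validate_llm_narrative, in A's order
def pvCheck (parsed : List (List Char × List (List Char))) : Bool :=
  if parsed.length ≠ 5 then false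
  else if ¬ ((parsed.zip pvExpected).all fun pe =>
      PySem.Chars.lower (PySem.Chars.strip pe.1.1) == PySem.Chars.lower pe.2) then false
  else parsed.all fun s => decide (1 ≤ s.2.length) && decide (s.2.length ≤ 3)

def validate_llm_narrative (candidate_markdown : String) : Bool :=
  pvCheck (pvParse candidate_markdown)

-- ===== PORT B =====
def pvExpectedLower : List (List Char) :=
  ["venue profile".toList, "form guide".toList, "head-to-head".toList,
   "key matchup factor".toList, "preview take".toList]

-- loop body of B; state = none after an early 'return False', else some (idx, cur)
def pvAltStep (st : Option (Nat × Option Nat)) (raw : List Char) : Option (Nat × Option Nat) :=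
  match st with
  | none => none
  | some (idx, cur) =>
    let line := PySem.Chars.strip raw
    if PySem.Chars.startswith line "## ".toList then
      if (match cur with
          | some c => !(decide (1 ≤ c) && decide (c ≤ 3))
          | none => false) then none
      else if 5 ≤ idx then none
      else if PySem.Chars.lower (PySem.Chars.strip (PySem.List.slice line (some 3) none))
          == pvExpectedLower.getD idx [] then some (idx + 1, some 0)
      else none
    else if PySem.Chars.startswith line "- ".toList then
      match cur with
      | some c => some (idx, some (c + 1))
      | none => st
    else st

-- B's final 'return cur is not None and 1 <= cur <= 3 and idx == 5'
def pvAltFinal (st : Option (Nat × Option Nat)) : Bool :=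
  match st with
  | some (idx, some c) => decide (1 ≤ c) && decide (c ≤ 3) && idx == 5
  | _ => false

def validate_llm_narrative_alt (candidate_markdown : String) : Bool :=
  pvAltFinal ((PySem.Chars.splitlines candidate_markdown.toList).foldl pvAltStep (some (0, none)))

-- ===== PRECONDITION & SPEC =====
def Spec_validate_llm_narrative (candidate_markdown : String) (out : Bool) : Prop := out = validate_llm_narrative_alt candidate_markdown
instance (candidate_markdown : String) (out : Bool) : Decidable (Spec_validate_llm_narrative candidate_markdown out) := by unfold Spec_validate_llm_narrative; infer_instance

-- ===== CLAIM (what is proved, stated in full; the proofs are below) =====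
def Claim_equal_validate_llm_narrative : Prop := ∀ (candidate_markdown : String), Dom_validate_llm_narrative candidate_markdown → Spec_validate_llm_narrative candidate_markdown (validate_llm_narrative candidate_markdown)

-- ===== LEMMAS AND PROOFS =====

theorem pvRstripIdem (t : List Char) :
    PySem.Chars.rstrip (PySem.Chars.rstrip t) = PySem.Chars.rstrip t := by
  simp [PySem.Chars.rstrip, List.dropWhile_idempotent]

theorem pvStripIdem (s : List Char) :
    PySem.Chars.strip (PySem.Chars.strip s) = PySem.Chars.strip s := by
  unfold PySem.Chars.strip
  have h1 : PySem.Chars.lstrip (PySem.Chars.rstrip (PySem.Chars.lstrip s))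
      = PySem.Chars.rstrip (PySem.Chars.lstrip s) := by
    unfold PySem.Chars.lstrip PySem.Chars.rstrip
    set p := PySem.Chars.isspace
    set l := List.dropWhile p s with hl
    rw [List.dropWhile_eq_self_iff]
    intro hlen hp
    have hpre : (List.dropWhile p l.reverse).reverse <+: l := by
      have := (List.dropWhile_suffix (l := l.reverse) p).reverse
      simpa using this
    have hne : l ≠ [] := by
      intro h; rw [h] at hlen; simp at hlen
    have hget : (List.dropWhile p l.reverse).reverse[0] = l[0]'(by
        rcases hpre with ⟨r, hr⟩
        have hlen' : 0 < (List.dropWhile p l.reverse).reverse.length := hlen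
        have : 0 < l.length := by
          rw [← hr]; simp at hlen' ⊢; omega
        exact this) := by
      exact List.IsPrefix.getElem hpre _
    have hhead : p (l.head hne) = false := by
      have := List.head_dropWhile_not p (l := s) (by rw [← hl] at *; exact hne)
      simpa [← hl] using this
    rw [hget] at hp
    rw [List.getElem_zero_eq_head] at hp
    rw [hhead] at hp
    exact Bool.false_ne_true hp
  rw [h1, pvRstripIdem]

-- expected position i (B's lowered titles; [] past the end)
def pvExpAt (i : Nat) : List Char := pvExpectedLower.getD i []

def pvGoodSec (i : Nat) (sec : List Char × List (List Char)) : Prop :=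
  PySem.Chars.lower (PySem.Chars.strip sec.1) = pvExpAt i ∧ 1 ≤ sec.2.length ∧ sec.2.length ≤ 3

def pvOpenCnt (o : Option (List Char × List (List Char))) : Nat := if o.isSome then 1 else 0

def pvInv (st : List (List Char × List (List Char)) × Option (List Char × List (List Char)))
    (idx : Nat) (copt : Option Nat) : Prop :=
  idx = st.1.length + pvOpenCnt st.2 ∧
  (∀ i (h : i < st.1.length), pvGoodSec i st.1[i]) ∧
  (match st.2 with
   | none => copt = none ∧ st.1 = []
   | some c => copt = some c.2.length ∧
       PySem.Chars.lower (PySem.Chars.strip c.1) = pvExpAt st.1.length)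

def pvBad (st : List (List Char × List (List Char)) × Option (List Char × List (List Char))) : Prop :=
  5 < st.1.length + pvOpenCnt st.2
  ∨ (∃ i, ∃ _ : i < st.1.length, ¬ pvGoodSec i st.1[i])
  ∨ (∃ c, st.2 = some c ∧ PySem.Chars.lower (PySem.Chars.strip c.1) ≠ pvExpAt st.1.length)

theorem pvLit0 : PySem.Chars.lower ['V', 'e', 'n', 'u', 'e', ' ', 'P', 'r', 'o', 'f', 'i', 'l', 'e'] = "venue profile".toList := by decide
theorem pvLit1 : PySem.Chars.lower ['F', 'o', 'r', 'm', ' ', 'G', 'u', 'i', 'd', 'e'] = "form guide".toList := by decide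
theorem pvLit2 : PySem.Chars.lower ['H', 'e', 'a', 'd', '-', 't', 'o', '-', 'H', 'e', 'a', 'd'] = "head-to-head".toList := by decide
theorem pvLit3 : PySem.Chars.lower ['K', 'e', 'y', ' ', 'M', 'a', 't', 'c', 'h', 'u', 'p', ' ', 'F', 'a', 'c', 't', 'o', 'r'] = "key matchup factor".toList := by decide
theorem pvLit4 : PySem.Chars.lower ['P', 'r', 'e', 'v', 'i', 'e', 'w', ' ', 'T', 'a', 'k', 'e'] = "preview take".toList := by decide

theorem pvCheck_iff (parsed : List (List Char × List (List Char))) :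
    pvCheck parsed = true ↔
      parsed.length = 5 ∧ ∀ i (h : i < parsed.length), pvGoodSec i parsed[i] := by
  by_cases hl : parsed.length = 5
  · obtain ⟨a, b, c, d, e, rfl⟩ : ∃ a b c d e, parsed = [a, b, c, d, e] := by
      match parsed, hl with
      | [a, b, c, d, e], _ => exact ⟨a, b, c, d, e, rfl⟩
    constructor
    · intro h
      refine ⟨rfl, ?_⟩
      unfold pvCheck at h
      split_ifs at h with hA hB
      have hall1 := hB
      simp [pvExpected, pvLit0, pvLit1, pvLit2, pvLit3, pvLit4] at hall1
      simp at h
      intro i hi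
      have hi5 : i < 5 := by simpa using hi
      interval_cases i <;> simp [pvGoodSec, pvExpAt, pvExpectedLower] <;> tauto
    · rintro ⟨-, hall⟩
      have h0 := hall 0 (by simp)
      have h1 := hall 1 (by simp)
      have h2 := hall 2 (by simp)
      have h3 := hall 3 (by simp)
      have h4 := hall 4 (by simp)
      simp [pvGoodSec, pvExpAt, pvExpectedLower] at h0 h1 h2 h3 h4
      unfold pvCheck
      rw [if_neg (by simp), if_neg (by
        simp [pvExpected, pvLit0, pvLit1, pvLit2, pvLit3, pvLit4]
        tauto)]
      simp
      tauto
  · constructor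
    · intro h
      exfalso
      unfold pvCheck at h
      rw [if_pos hl] at h
      exact Bool.false_ne_true h
    · rintro ⟨h5, -⟩; exact absurd h5 hl

theorem pvClose_length (st : List (List Char × List (List Char)) × Option (List Char × List (List Char))) :
    (pvClose st).length = st.1.length + pvOpenCnt st.2 := by
  obtain ⟨l, o⟩ := st
  cases o <;> simp [pvClose, pvOpenCnt]

theorem pvClose_getElem_left (st : List (List Char × List (List Char)) × Option (List Char × List (List Char)))
    (i : Nat) (hi : i < st.1.length) (hi' : i < (pvClose st).length) :
    (pvClose st)[i] = st.1[i] := by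
  obtain ⟨l, o⟩ := st
  cases o <;> simp_all [pvClose, List.getElem_append_left]

theorem pvClose_getElem_cur (st : List (List Char × List (List Char)) × Option (List Char × List (List Char)))
    (c : List Char × List (List Char)) (hc : st.2 = some c)
    (hi' : st.1.length < (pvClose st).length) :
    (pvClose st)[st.1.length] = c := by
  obtain ⟨l, o⟩ := st
  simp at hc
  subst hc
  simp [pvClose]

theorem pvBad_check (st : List (List Char × List (List Char)) × Option (List Char × List (List Char)))
    (h : pvBad st) : pvCheck (pvClose st) = false := by
  rw [Bool.eq_false_iff]
  intro hcv
  obtain ⟨h5, hall⟩ := (pvCheck_iff _).mp hcv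
  rcases h with h1 | ⟨i, hi, hbad⟩ | ⟨c, hc, hbad⟩
  · have := pvClose_length st
    omega
  · have hi' : i < (pvClose st).length := by rw [pvClose_length]; omega
    have := hall i hi'
    rw [pvClose_getElem_left st i hi hi'] at this
    exact hbad this
  · have hi' : st.1.length < (pvClose st).length := by
      rw [pvClose_length, hc]; simp [pvOpenCnt]
    have := hall st.1.length hi'
    rw [pvClose_getElem_cur st c hc hi'] at this
    exact hbad this.1

theorem pvBad_step (st : List (List Char × List (List Char)) × Option (List Char × List (List Char)))
    (raw : List Char) (h : pvBad st) : pvBad (pvParseStep st raw) := by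
  obtain ⟨l, o⟩ := st
  unfold pvParseStep
  by_cases he : PySem.Chars.strip raw = []
  · simpa [he] using h
  by_cases h1 : PySem.Chars.startswith (PySem.Chars.strip raw) "## ".toList
  · rw [if_neg he, if_pos h1]
    unfold pvBad at h ⊢
    rcases h with hsum | ⟨i, hi, hbad⟩ | ⟨c, hc, hbad⟩
    · left
      have hcl := pvClose_length (l, o)
      simp [pvOpenCnt] at hsum hcl ⊢
      omega
    · right; left
      have hi' : i < (pvClose (l, o)).length := by rw [pvClose_length]; simp at hi ⊢; omega
      refine ⟨i, hi', ?_⟩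
      rw [pvClose_getElem_left (l, o) i hi hi']
      exact hbad
    · right; left
      have hi' : (l, o).1.length < (pvClose (l, o)).length := by
        rw [pvClose_length, hc]; simp [pvOpenCnt]
      refine ⟨l.length, hi', ?_⟩
      rw [pvClose_getElem_cur (l, o) c hc hi']
      intro hg
      exact hbad hg.1
  by_cases h2 : PySem.Chars.startswith (PySem.Chars.strip raw) "- ".toList
  · rw [if_neg he, if_neg h1, if_pos h2]
    cases o with
    | none => exact h
    | some c =>
      show pvBad (l, some (c.1, c.2 ++ [PySem.Chars.strip (PySem.List.slice (PySem.Chars.strip raw) (some 2) none)]))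
      unfold pvBad at h ⊢
      rcases h with hsum | ⟨i, hi, hbad⟩ | ⟨c', hc', hbad⟩
      · left
        simpa [pvOpenCnt] using hsum
      · right; left; exact ⟨i, hi, hbad⟩
      · right; right
        refine ⟨(c.1, c.2 ++ [PySem.Chars.strip (PySem.List.slice (PySem.Chars.strip raw) (some 2) none)]), rfl, ?_⟩
        simp at hc'
        subst hc'
        exact hbad
  · rw [if_neg he, if_neg h1, if_neg h2]
    exact h

theorem pvBad_fold (ls : List (List Char))
    (st : List (List Char × List (List Char)) × Option (List Char × List (List Char)))
    (h : pvBad st) : pvCheck (pvClose (ls.foldl pvParseStep st)) = false := by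
  induction ls generalizing st with
  | nil => exact pvBad_check st h
  | cons raw ls ih => exact ih _ (pvBad_step st raw h)

theorem pvAltStep_none (raw : List Char) : pvAltStep none raw = none := rfl

theorem pvAlt_fold_none (ls : List (List Char)) : ls.foldl pvAltStep none = none := by
  induction ls with
  | nil => rfl
  | cons raw ls ih => simpa [pvAltStep_none] using ih

theorem pvFinal_case (st : List (List Char × List (List Char)) × Option (List Char × List (List Char)))
    (idx : Nat) (copt : Option Nat) (h : pvInv st idx copt) :
    pvCheck (pvClose st) = pvAltFinal (some (idx, copt)) := by
  obtain ⟨l, o⟩ := st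
  obtain ⟨hidx, hclosed, hopen⟩ := h
  cases o with
  | none =>
    simp only at hopen
    obtain ⟨hc, hnil⟩ := hopen
    subst hc
    subst hnil
    simp [pvClose, pvCheck, pvAltFinal]
  | some c =>
    simp only at hopen
    obtain ⟨hc, htitle⟩ := hopen
    subst hc
    have hclose : pvClose ([] ++ l, some c) = l ++ [c] := by simp [pvClose]
    simp only at hidx hclosed htitle
    have hidx' : idx = l.length + 1 := by simpa [pvOpenCnt] using hidx
    show pvCheck (pvClose (l, some c)) = _
    rw [show pvClose (l, some c) = l ++ [c] from by simp [pvClose]]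
    by_cases hi5 : idx = 5
    · have hl4 : l.length = 4 := by omega
      by_cases hcnt : 1 ≤ c.2.length ∧ c.2.length ≤ 3
      · have hT : pvCheck (l ++ [c]) = true := by
          rw [pvCheck_iff]
          refine ⟨by simp [hl4], ?_⟩
          intro i hi
          have hi' : i < l.length + 1 := by simpa using hi
          rcases Nat.lt_or_ge i l.length with hlt | hge
          · rw [List.getElem_append_left hlt]
            exact hclosed i hlt
          · have : i = l.length := by omega
            subst this
            have hc' : (l ++ [c])[l.length]'(by simp) = c := by simp
            rw [hc']
            exact ⟨htitle, hcnt⟩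
        rw [hT]
        simp [pvAltFinal, hi5, hcnt.1, hcnt.2]
      · have hF : pvCheck (l ++ [c]) = false := by
          rw [Bool.eq_false_iff]
          intro hcv
          obtain ⟨-, hall⟩ := (pvCheck_iff _).mp hcv
          have := hall l.length (by simp)
          have hc' : (l ++ [c])[l.length]'(by simp) = c := by simp
          rw [hc'] at this
          exact hcnt this.2
        rw [hF]
        symm
        simp [pvAltFinal]
        omega
    · have hF : pvCheck (l ++ [c]) = false := by
        rw [Bool.eq_false_iff]
        intro hcv
        obtain ⟨h5, -⟩ := (pvCheck_iff _).mp hcv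
        simp at h5
        omega
      rw [hF]
      symm
      simp [pvAltFinal]
      omega

theorem pvMain (ls : List (List Char))
    (st : List (List Char × List (List Char)) × Option (List Char × List (List Char)))
    (idx : Nat) (copt : Option Nat) (h : pvInv st idx copt) :
    pvCheck (pvClose (ls.foldl pvParseStep st)) = pvAltFinal (ls.foldl pvAltStep (some (idx, copt))) := by
  induction ls generalizing st idx copt with
  | nil => simpa using pvFinal_case st idx copt h
  | cons raw ls ih =>
    simp only [List.foldl_cons]
    obtain ⟨hidx, hclosed, hopen⟩ := h
    by_cases h1 : PySem.Chars.startswith (PySem.Chars.strip raw) "## ".toList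
    · have h1' : PySem.Chars.startswith (PySem.Chars.strip raw) ['#', '#', ' '] = true := h1
      have hne : PySem.Chars.strip raw ≠ [] := by
        intro hnil
        rw [hnil] at h1
        exact absurd h1 (by decide)
      have hAstep : pvParseStep st raw
          = (pvClose st, some (PySem.Chars.strip (PySem.List.slice (PySem.Chars.strip raw) (some 3) none), [])) := by
        unfold pvParseStep
        rw [if_neg hne, if_pos h1]
      cases hst : st.2 with
      | none =>
        rw [hst] at hopen
        obtain ⟨hc, hnil⟩ := hopen
        subst hc
        have hidx0 : idx = 0 := by
          simp [hnil, hst, pvOpenCnt] at hidx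
          exact hidx
        have hcl0 : (pvClose st).length = 0 := by
          rw [pvClose_length, hst, hnil]
          simp [pvOpenCnt]
        have hBstep : pvAltStep (some (idx, none)) raw
            = (if PySem.Chars.lower (PySem.Chars.strip (PySem.List.slice (PySem.Chars.strip raw) (some 3) none))
                  == pvExpectedLower.getD idx [] then some (idx + 1, some 0) else none) := by
          simp [pvAltStep, h1', hidx0]
        by_cases hm : PySem.Chars.lower (PySem.Chars.strip (PySem.List.slice (PySem.Chars.strip raw) (some 3) none)) = pvExpAt idx
        · rw [hAstep, hBstep, if_pos (by simpa [pvExpAt] using hm)]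
          apply ih
          refine ⟨?_, ?_, ?_⟩
          · simp [pvOpenCnt, hcl0, hidx0]
          · intro i hi
            rw [hcl0] at hi
            omega
          · refine ⟨rfl, ?_⟩
            rw [pvStripIdem, hcl0]
            rw [hidx0] at hm
            exact hm
        · rw [hAstep, hBstep, if_neg (by simpa [pvExpAt] using hm), pvAlt_fold_none]
          rw [show pvAltFinal none = false from rfl]
          apply pvBad_fold
          right; right
          refine ⟨_, rfl, ?_⟩
          simp only [hcl0]
          rw [pvStripIdem]
          rw [hidx0] at hm
          exact hm
      | some c =>
        rw [hst] at hopen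
        obtain ⟨hc, htitle⟩ := hopen
        subst hc
        have hidx' : idx = st.1.length + 1 := by
          simpa [hst, pvOpenCnt] using hidx
        have hcl : (pvClose st).length = st.1.length + 1 := by
          rw [pvClose_length, hst]
          simp [pvOpenCnt]
        by_cases hcnt : 1 ≤ c.2.length ∧ c.2.length ≤ 3
        · have hguard : (!(decide (1 ≤ c.2.length) && decide (c.2.length ≤ 3))) = false := by
            simp [hcnt.1, hcnt.2]
          by_cases hi5 : 5 ≤ idx
          · have hBstep : pvAltStep (some (idx, some c.2.length)) raw = none := by
              simp [pvAltStep, h1', hguard, hi5]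
            rw [hAstep, hBstep, pvAlt_fold_none]
            rw [show pvAltFinal none = false from rfl]
            apply pvBad_fold
            left
            simp only [pvOpenCnt, Option.isSome_some, if_pos]
            omega
          · by_cases hm : PySem.Chars.lower (PySem.Chars.strip (PySem.List.slice (PySem.Chars.strip raw) (some 3) none)) = pvExpAt idx
            · have hBstep : pvAltStep (some (idx, some c.2.length)) raw = some (idx + 1, some 0) := by
                simp [pvAltStep, h1', hguard, hi5, pvExpAt] at hm ⊢
                simp [hm]
              rw [hAstep, hBstep]
              apply ih
              refine ⟨?_, ?_, ?_⟩
              · simp [pvOpenCnt, hcl]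
                omega
              · intro i hi
                rw [hcl] at hi
                rcases Nat.lt_or_ge i st.1.length with hlt | hge
                · rw [pvClose_getElem_left st i hlt (by omega)]
                  exact hclosed i hlt
                · have hieq : i = st.1.length := by omega
                  subst hieq
                  rw [pvClose_getElem_cur st c hst (by omega)]
                  exact ⟨htitle, hcnt⟩
              · refine ⟨rfl, ?_⟩
                rw [pvStripIdem, hcl]
                rw [hidx'] at hm
                exact hm
            · have hBstep : pvAltStep (some (idx, some c.2.length)) raw = none := by
                simp [pvAltStep, h1', hguard, hi5]
                simpa [pvExpAt, List.getD] using hm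
              rw [hAstep, hBstep, pvAlt_fold_none]
              rw [show pvAltFinal none = false from rfl]
              apply pvBad_fold
              right; right
              refine ⟨_, rfl, ?_⟩
              simp only [hcl]
              rw [pvStripIdem]
              rw [hidx'] at hm
              exact hm
        · have hguard : (!(decide (1 ≤ c.2.length) && decide (c.2.length ≤ 3))) = true := by
            rcases Nat.lt_or_ge 3 c.2.length with hgt | hle
            · simp [show ¬(c.2.length ≤ 3) from by omega]
            · simp [show c.2.length = 0 from by omega]
          have hBstep : pvAltStep (some (idx, some c.2.length)) raw = none := by
            simp [pvAltStep, h1', hguard]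
          rw [hAstep, hBstep, pvAlt_fold_none]
          rw [show pvAltFinal none = false from rfl]
          apply pvBad_fold
          right; left
          refine ⟨st.1.length, by rw [hcl]; omega, ?_⟩
          rw [pvClose_getElem_cur st c hst (by omega)]
          intro hg
          exact hcnt hg.2
    · have h1' : PySem.Chars.startswith (PySem.Chars.strip raw) ['#', '#', ' '] = false := by
        simpa using h1
      by_cases h2 : PySem.Chars.startswith (PySem.Chars.strip raw) "- ".toList
      · have h2' : PySem.Chars.startswith (PySem.Chars.strip raw) ['-', ' '] = true := h2
        have hne : PySem.Chars.strip raw ≠ [] := by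
          intro hnil
          rw [hnil] at h2
          exact absurd h2 (by decide)
        cases hst : st.2 with
        | none =>
          rw [hst] at hopen
          obtain ⟨hc, hnil⟩ := hopen
          subst hc
          have hAstep : pvParseStep st raw = st := by
            unfold pvParseStep
            rw [if_neg hne, if_neg h1, if_pos h2, hst]
          have hBstep : pvAltStep (some (idx, none)) raw = some (idx, none) := by
            simp [pvAltStep, h1', h2']
          rw [hAstep, hBstep]
          exact ih st idx none ⟨hidx, hclosed, by rw [hst]; exact ⟨rfl, hnil⟩⟩
        | some c =>
          rw [hst] at hopen
          obtain ⟨hc, htitle⟩ := hopen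
          subst hc
          have hAstep : pvParseStep st raw
              = (st.1, some (c.1, c.2 ++ [PySem.Chars.strip (PySem.List.slice (PySem.Chars.strip raw) (some 2) none)])) := by
            unfold pvParseStep
            rw [if_neg hne, if_neg h1, if_pos h2, hst]
          have hBstep : pvAltStep (some (idx, some c.2.length)) raw = some (idx, some (c.2.length + 1)) := by
            simp [pvAltStep, h1', h2']
          rw [hAstep, hBstep]
          apply ih
          refine ⟨?_, ?_, ?_⟩
          · simpa [pvOpenCnt, hst] using hidx
          · exact hclosed
          · exact ⟨by simp, by simpa using htitle⟩
      · have h2' : PySem.Chars.startswith (PySem.Chars.strip raw) ['-', ' '] = false := by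
          simpa using h2
        have hAstep : pvParseStep st raw = st := by
          unfold pvParseStep
          by_cases he : PySem.Chars.strip raw = []
          · rw [if_pos he]
          · rw [if_neg he, if_neg h1, if_neg h2]
        have hBstep : pvAltStep (some (idx, copt)) raw = some (idx, copt) := by
          simp [pvAltStep, h1', h2']
        rw [hAstep, hBstep]
        exact ih st idx copt ⟨hidx, hclosed, hopen⟩

-- ===== VERDICT (by name: the statement is the Claim_ definition above) =====
theorem validate_llm_narrative_spec : Claim_equal_validate_llm_narrative := by
  intro s _
  unfold Spec_validate_llm_narrative validate_llm_narrative validate_llm_narrative_alt pvParse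
  exact pvMain _ _ 0 none (by constructor <;> simp [pvOpenCnt])
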